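-- pv_equiv track=rewrite | github.com/Rajeevkavala/Resume_Buddy | modules/interview_questions.py | get_basic_interview_questions_by_type
-- ===== SOURCE A (Python) =====
-- def get_basic_interview_questions_by_type(interview_type, num_questions):
--     """Get basic interview questions by type."""
--     question_templates = {
--         "Technical Interview": [
--             "Describe your technical expertise and key technologies you've worked with.",
--             "How do you approach problem-solving in technical challenges?",
--             "Can you walk me through a challenging technical project you've completed?",
--             "How do you stay updated with new technologies and industry trends?",
--             "Describe a time when you had to learn a new technology quickly."
--         ],
--         "Behavioral Interview": [
--             "Tell me about a time when you faced a significant challenge at work.",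
--             "Describe a situation where you had to work with a difficult team member.",
--             "How do you handle stress and pressure in the workplace?",
--             "Tell me about a time when you made a mistake and how you handled it.",
--             "Describe a situation where you had to meet a tight deadline."
--         ],
--         "Leadership Interview": [
--             "Describe your leadership style and how you motivate team members.",
--             "Tell me about a time when you had to make a difficult decision as a leader.",
--             "How do you handle conflict within your team?",
--             "Describe a situation where you had to implement change in your organization.",
--             "How do you develop and mentor team members?"
--         ],
--         "General Interview": [
--             "Tell me about yourself.",
--             "Why are you interested in this position?",
--             "What are your greatest strengths?",
--             "What are your areas for improvement?",
--             "Where do you see yourself in 5 years?"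
--         ],
--         "Industry-Specific": [
--             "What industry trends do you think will impact our business?",
--             "How do you stay current with industry developments?",
--             "What do you think sets our company apart in the industry?",
--             "How would you contribute to our company's goals?",
--             "What challenges do you see facing our industry?"
--         ]
--     }
--
--     questions = question_templates.get(interview_type, question_templates["General Interview"])
--     # Repeat questions if needed to reach num_questions
--     while len(questions) < num_questions:
--         questions.extend(question_templates.get(interview_type, question_templates["General Interview"]))
--
--     return questions[:num_questions]
-- ===== SOURCE B (Python) =====
-- def get_basic_interview_questions_by_type(interview_type, num_questions):
--     """Get basic interview questions by type."""
--     question_templates = {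
--         "Technical Interview": [
--             "Describe your technical expertise and key technologies you've worked with.",
--             "How do you approach problem-solving in technical challenges?",
--             "Can you walk me through a challenging technical project you've completed?",
--             "How do you stay updated with new technologies and industry trends?",
--             "Describe a time when you had to learn a new technology quickly."
--         ],
--         "Behavioral Interview": [
--             "Tell me about a time when you faced a significant challenge at work.",
--             "Describe a situation where you had to work with a difficult team member.",
--             "How do you handle stress and pressure in the workplace?",
--             "Tell me about a time when you made a mistake and how you handled it.",
--             "Describe a situation where you had to meet a tight deadline."
--         ],
--         "Leadership Interview": [
--             "Describe your leadership style and how you motivate team members.",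
--             "Tell me about a time when you had to make a difficult decision as a leader.",
--             "How do you handle conflict within your team?",
--             "Describe a situation where you had to implement change in your organization.",
--             "How do you develop and mentor team members?"
--         ],
--         "General Interview": [
--             "Tell me about yourself.",
--             "Why are you interested in this position?",
--             "What are your greatest strengths?",
--             "What are your areas for improvement?",
--             "Where do you see yourself in 5 years?"
--         ],
--         "Industry-Specific": [
--             "What industry trends do you think will impact our business?",
--             "How do you stay current with industry developments?",
--             "What do you think sets our company apart in the industry?",
--             "How would you contribute to our company's goals?",
--             "What challenges do you see facing our industry?"
--         ]
--     }
--     base = question_templates.get(interview_type, question_templates["General Interview"])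
--     n = len(base)
--     if num_questions <= n:
--         # slice semantics (incl. zero/negative counts), no repetition needed
--         return base[:num_questions]
--     # cyclic pick: question i is base[i % n]
--     return [base[i % n] for i in range(num_questions)]
-- ===== Notes on version B (the rewrite author's own statement) =====
-- stated objective: simpler
-- what changed: Replaces A's self-extending (list-doubling) while-loop and final slice with a direct per-index cyclic selection base[i % n] (plain slice when num_questions <= len(base)).
import Mathlib
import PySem

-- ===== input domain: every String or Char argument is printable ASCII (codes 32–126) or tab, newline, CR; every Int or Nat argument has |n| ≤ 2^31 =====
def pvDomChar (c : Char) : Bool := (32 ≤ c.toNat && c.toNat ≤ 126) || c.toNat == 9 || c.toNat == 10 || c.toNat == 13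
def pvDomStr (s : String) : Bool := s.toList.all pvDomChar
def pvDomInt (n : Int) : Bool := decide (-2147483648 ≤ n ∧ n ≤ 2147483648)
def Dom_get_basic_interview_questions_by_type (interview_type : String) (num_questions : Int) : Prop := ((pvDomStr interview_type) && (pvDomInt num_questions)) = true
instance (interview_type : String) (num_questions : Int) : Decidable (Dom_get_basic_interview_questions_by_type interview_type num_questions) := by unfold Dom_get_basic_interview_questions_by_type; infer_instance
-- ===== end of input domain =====

-- B replaces A's self-extending doubling while-loop by direct per-index cyclic selection base[i % n] (objective: simpler).

-- ===== PORT A =====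
-- the question_templates dict (shared constant data of both programs)
def pvGeneral : List String :=
  ["Tell me about yourself.",
   "Why are you interested in this position?",
   "What are your greatest strengths?",
   "What are your areas for improvement?",
   "Where do you see yourself in 5 years?"]

def pvTemplates : PySem.Dict String (List String) :=
  PySem.Dict.ofList
    [("Technical Interview",
      ["Describe your technical expertise and key technologies you've worked with.",
       "How do you approach problem-solving in technical challenges?",
       "Can you walk me through a challenging technical project you've completed?",
       "How do you stay updated with new technologies and industry trends?",
       "Describe a time when you had to learn a new technology quickly."]),
     ("Behavioral Interview",
      ["Tell me about a time when you faced a significant challenge at work.",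
       "Describe a situation where you had to work with a difficult team member.",
       "How do you handle stress and pressure in the workplace?",
       "Tell me about a time when you made a mistake and how you handled it.",
       "Describe a situation where you had to meet a tight deadline."]),
     ("Leadership Interview",
      ["Describe your leadership style and how you motivate team members.",
       "Tell me about a time when you had to make a difficult decision as a leader.",
       "How do you handle conflict within your team?",
       "Describe a situation where you had to implement change in your organization.",
       "How do you develop and mentor team members?"]),
     ("General Interview", pvGeneral),
     ("Industry-Specific",
      ["What industry trends do you think will impact our business?",
       "How do you stay current with industry developments?",
       "What do you think sets our company apart in the industry?",
       "How would you contribute to our company's goals?",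
       "What challenges do you see facing our industry?"])]

-- question_templates.get(interview_type, question_templates["General Interview"])
def pvBase (t : String) : List String := PySem.Dict.getD pvTemplates t pvGeneral

theorem pvBase_ne_nil (t : String) : pvBase t ≠ [] := by
  unfold pvBase pvTemplates pvGeneral
  simp only [PySem.Dict.ofList, PySem.Dict.update, List.foldl, PySem.Dict.getD_insert,
    PySem.Dict.getD_empty]
  split_ifs <;> simp

-- A's while-loop. In Python `questions` ALIASES the dict's stored list, so
-- `questions.extend(question_templates.get(...))` appends the already-extended list
-- to itself: qs := qs ++ qs (doubling). Ported exactly; the ≠ [] argument only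
-- certifies termination (unreachable here: every template list is non-empty).
def pvLoopA (num : Int) (qs : List String) (h : qs ≠ []) : List String :=
  if hlt : ((qs.length : Int) < num) then
    pvLoopA num (qs ++ qs) (by simp [h])
  else qs
termination_by (num - (qs.length : Int)).toNat
decreasing_by
  have hp : 0 < qs.length := List.length_pos_iff.mpr h
  simp only [List.length_append]
  omega

def get_basic_interview_questions_by_type (interview_type : String) (num_questions : Int) : List String :=
  PySem.List.slice (pvLoopA num_questions (pvBase interview_type) (pvBase_ne_nil interview_type)) none (some num_questions)

-- ===== PORT B =====
-- Source B: if num_questions <= n return base[:num_questions]; else [base[i % n] for i in range(num_questions)]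
-- (the index i % n is always in range, so pyGetD's default "" is never produced)
def get_basic_interview_questions_by_type_alt (interview_type : String) (num_questions : Int) : List String :=
  let base := pvBase interview_type
  let n : Int := PySem.List.len base
  if num_questions ≤ n then
    PySem.List.slice base none (some num_questions)
  else
    (PySem.List.pyRange 0 num_questions 1).map
      (fun i => PySem.List.pyGetD base (PySem.Int.mod i n) "")

-- ===== PRECONDITION & SPEC =====
def Spec_get_basic_interview_questions_by_type (interview_type : String) (num_questions : Int) (out : List String) : Prop := out = get_basic_interview_questions_by_type_alt interview_type num_questions
instance (interview_type : String) (num_questions : Int) (out : List String) : Decidable (Spec_get_basic_interview_questions_by_type interview_type num_questions out) := by unfold Spec_get_basic_interview_questions_by_type; infer_instance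

-- ===== CLAIM (what is proved, stated in full; the proofs are below) =====
def Claim_equal_get_basic_interview_questions_by_type : Prop := ∀ (interview_type : String) (num_questions : Int), Dom_get_basic_interview_questions_by_type interview_type num_questions → Spec_get_basic_interview_questions_by_type interview_type num_questions (get_basic_interview_questions_by_type interview_type num_questions)

-- ===== LEMMAS AND PROOFS =====

theorem pvBase_len (t : String) : (pvBase t).length = 5 := by
  unfold pvBase pvTemplates pvGeneral
  simp only [PySem.Dict.ofList, PySem.Dict.update, List.foldl, PySem.Dict.getD_insert,
    PySem.Dict.getD_empty]
  split_ifs <;> simp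

theorem pvFlat_len {α : Type} (l : List α) (m : Nat) :
    ((List.replicate m l).flatten).length = m * l.length := by
  induction m with
  | zero => simp
  | succ k ih => simp [List.replicate_succ, ih]; ring

-- A's loop always produces a whole number of copies of the base list,
-- long enough to cover num
theorem pvLoop_spec (num : Int) (base : List String) (hb : base ≠ []) :
    ∀ (k m : Nat), 0 < m → (num - ((m * base.length : Nat) : Int)).toNat ≤ k →
    ∀ (qs : List String) (_hqs : qs = (List.replicate m base).flatten) (h : qs ≠ []),
    ∃ M : Nat, 0 < M ∧
      pvLoopA num qs h = (List.replicate M base).flatten ∧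
      (num : Int) ≤ ((M * base.length : Nat) : Int) := by
  have hlp : 0 < base.length := List.length_pos_iff.mpr hb
  intro k
  induction k with
  | zero =>
    intro m hm hk qs hqs h
    subst hqs
    have h1 : 1 ≤ m * base.length := Nat.one_le_iff_ne_zero.mpr (by positivity)
    have hg : ¬((((List.replicate m base).flatten.length : Nat) : Int) < num) := by
      rw [pvFlat_len]; omega
    exact ⟨m, hm, by rw [pvLoopA, dif_neg hg], by omega⟩
  | succ k ih =>
    intro m hm hk qs hqs h
    by_cases hg : ((qs.length : Int) < num)
    · rw [pvLoopA, dif_pos hg]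
      have hqq : qs ++ qs = (List.replicate (m + m) base).flatten := by
        rw [hqs, ← List.flatten_append, ← List.replicate_add]
      have hx : 1 ≤ m * base.length := Nat.one_le_iff_ne_zero.mpr (by positivity)
      have hsum : (m + m) * base.length = m * base.length + m * base.length := by ring
      have hglen : ((m * base.length : Nat) : Int) < num := by
        rw [hqs, pvFlat_len] at hg; exact_mod_cast hg
      exact ih (m + m) (by omega) (by rw [hsum]; push_cast; push_cast at hk hglen; omega)
        (qs ++ qs) hqq (by simp [h])
    · refine ⟨m, hm, ?_, ?_⟩
      · rw [pvLoopA, dif_neg hg]; exact hqs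
      · rw [hqs, pvFlat_len] at hg; push_cast; push_cast at hg; omega

-- element k of M concatenated copies of l is l[k % l.length]
theorem pvFlat_getElem? {α : Type} (l : List α) (hl : l ≠ []) :
    ∀ (M k : Nat), k < M * l.length →
      ((List.replicate M l).flatten)[k]? = l[k % l.length]? := by
  have hlp : 0 < l.length := List.length_pos_iff.mpr hl
  intro M
  induction M with
  | zero => intro k hk; omega
  | succ m ih =>
    intro k hk
    rw [List.replicate_succ, List.flatten_cons]
    by_cases hlt : k < l.length
    · rw [List.getElem?_append_left hlt, Nat.mod_eq_of_lt hlt]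
    · have hle : l.length ≤ k := by omega
      rw [List.getElem?_append_right hle, Nat.mod_eq_sub_mod hle]
      rw [Nat.succ_mul] at hk
      exact ih (k - l.length) (by omega)

-- take n of enough copies of l equals the cyclic selection map
theorem pvTake_flat_eq_map {α : Type} [Inhabited α] (l : List α) (hl : l ≠ []) (d : α)
    (M n : Nat) (hn : n ≤ M * l.length) :
    ((List.replicate M l).flatten).take n =
      (List.range n).map (fun k => l.getD (k % l.length) d) := by
  have hlp : 0 < l.length := List.length_pos_iff.mpr hl
  apply List.ext_getElem?
  intro k
  by_cases hk : k < n
  · rw [List.getElem?_take_of_lt hk, pvFlat_getElem? l hl M k (by omega),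
      List.getElem?_map, List.getElem?_range hk]
    have hm : k % l.length < l.length := Nat.mod_lt _ hlp
    simp [List.getD_eq_getElem?_getD, List.getElem?_eq_getElem hm]
  · rw [List.getElem?_eq_none (by simp; omega), List.getElem?_eq_none (by simp; omega)]

-- ===== VERDICT (by name: the statement is the Claim_ definition above) =====
theorem get_basic_interview_questions_by_type_spec : Claim_equal_get_basic_interview_questions_by_type := by
  intro t num _
  unfold Spec_get_basic_interview_questions_by_type
  unfold get_basic_interview_questions_by_type get_basic_interview_questions_by_type_alt
  have hbl : (pvBase t).length = 5 := pvBase_len t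
  have hbn : pvBase t ≠ [] := pvBase_ne_nil t
  simp only [PySem.List.len_eq, hbl]
  by_cases h5 : num ≤ ((5 : Nat) : Int)
  · -- B's slice branch; A's loop body never runs
    rw [if_pos h5, pvLoopA, dif_neg (by rw [hbl]; push_cast; push_cast at h5; omega)]
  · -- num > 5: A is take num of whole copies of base; B is the cyclic map
    rw [if_neg h5]
    push_cast at h5
    obtain ⟨M, hM, heq, hle⟩ := pvLoop_spec num (pvBase t) hbn
      (num - ((1 * (pvBase t).length : Nat) : Int)).toNat 1 (by norm_num)
      (le_refl _) (pvBase t) (by simp) hbn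
    rw [heq, PySem.List.slice_to _ (by omega)]
    rw [PySem.List.pyRange_one, List.map_map]
    have hmap : ((fun i => PySem.List.pyGetD (pvBase t) (PySem.Int.mod i ((5:Nat):Int)) "") ∘
        fun k : Nat => (0 : Int) + (k : Int)) =
        fun k : Nat => (pvBase t).getD (k % 5) "" := by
      funext k
      simp only [Function.comp, zero_add, PySem.Int.mod_natCast, PySem.List.pyGetD_natCast]
    rw [hmap]
    have hrange : ((num - 0).toNat) = num.toNat := by omega
    rw [hrange]
    have := pvTake_flat_eq_map (pvBase t) hbn "" M num.toNat
      (by rw [hbl]; rw [hbl] at hle; push_cast at hle; omega)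
    rw [hbl] at this
    exact this
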